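-- pv_equiv track=rewrite | github.com/cybertronai/ByteDMD-definition | experiments/heuristic_grid/algorithms.py | flash_attention_flops
-- ===== SOURCE A (Python) =====
-- def flash_attention_flops(n: int, d: int, bk: int) -> int:
--     total = 0
--     num_blocks = (n + bk - 1) // bk
--     for _ in range(n):
--         for kb in range(num_blocks):
--             block_size = min(bk, n - kb * bk)
--             total += block_size * (2 * d - 1)
--             total += max(0, block_size - 1)
--             total += block_size + block_size
--             total += max(0, block_size - 1)
--             total += d * (2 * block_size - 1)
--             if kb > 0:
--                 total += 1 + 2 + 2 + 3 + d * 3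
--         total += 1 + d
--     return total
-- ===== SOURCE B (Python) =====
-- def flash_attention_flops(n: int, d: int, bk: int) -> int:
--     # Closed form: every row costs the same; all blocks are full (size bk)
--     # except the last one (size r). O(1) instead of A's O(n * num_blocks).
--     if n <= 0:
--         return 0
--     num_blocks = (n + bk - 1) // bk
--     r = n - (num_blocks - 1) * bk  # size of the last (possibly partial) block
--     base = lambda bs: 4 * d * bs + 3 * bs - 2 - d  # per-block cost for block size bs >= 1
--     inner = (num_blocks - 1) * base(bk) + base(r) + (num_blocks - 1) * (8 + 3 * d) + (1 + d)
--     return n * inner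
-- ===== Notes on version B (the rewrite author's own statement) =====
-- stated objective: faster
-- what changed: Replaces A's nested loops (n rows x num_blocks blocks) by an O(1) closed form: per-block cost simplified to 4*d*bs+3*bs-2-d, summed over num_blocks-1 full blocks plus the last partial block, multiplied by n.
-- outside the precondition, e.g. on flash_attention_flops(1, 2, -3): A returns -26, B returns 10; on flash_attention_flops(5, 2, -3): A returns 15, B returns 170
import Mathlib
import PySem

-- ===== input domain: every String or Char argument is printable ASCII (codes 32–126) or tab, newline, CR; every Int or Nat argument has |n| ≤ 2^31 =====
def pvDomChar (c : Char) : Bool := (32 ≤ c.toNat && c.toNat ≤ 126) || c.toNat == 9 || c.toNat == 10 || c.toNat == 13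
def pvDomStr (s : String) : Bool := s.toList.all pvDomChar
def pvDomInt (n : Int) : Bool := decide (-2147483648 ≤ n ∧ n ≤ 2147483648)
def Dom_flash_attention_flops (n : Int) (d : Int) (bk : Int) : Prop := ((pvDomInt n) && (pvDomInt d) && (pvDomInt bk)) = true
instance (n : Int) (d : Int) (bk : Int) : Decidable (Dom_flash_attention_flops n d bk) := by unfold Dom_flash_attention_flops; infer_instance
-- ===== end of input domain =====

-- B replaces A's nested per-row/per-block loops by an O(1) closed form (faster, asymptotic).


-- ===== PORT A =====
def flash_attention_flops (n : Int) (d : Int) (bk : Int) : Int :=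
  let num_blocks := PySem.Int.floordiv (n + bk - 1) bk
  (PySem.List.pyRange 0 n 1).foldl (fun total _ =>
    ((PySem.List.pyRange 0 num_blocks 1).foldl (fun total kb =>
      let block_size := min bk (n - kb * bk)
      let total := total + block_size * (2 * d - 1)
      let total := total + max 0 (block_size - 1)
      let total := total + (block_size + block_size)
      let total := total + max 0 (block_size - 1)
      let total := total + d * (2 * block_size - 1)
      if kb > 0 then total + (1 + 2 + 2 + 3 + d * 3) else total) total)
    + (1 + d)) 0

-- ===== PORT B =====
def flash_attention_flops_alt (n : Int) (d : Int) (bk : Int) : Int :=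
  if n ≤ 0 then 0
  else
    let num_blocks := PySem.Int.floordiv (n + bk - 1) bk
    let r := n - (num_blocks - 1) * bk
    let base : Int → Int := fun bs => 4 * d * bs + 3 * bs - 2 - d
    n * ((num_blocks - 1) * base bk + base r + (num_blocks - 1) * (8 + 3 * d) + (1 + d))

-- ===== PRECONDITION & SPEC =====
-- Pre_ restricts to the function's natural domain, a positive block size: bk = 0 makes A
-- raise ZeroDivisionError, and for bk < 0 A returns values computed from negative
-- "block sizes", which are outside the natural domain of a FLOP count.
def Pre_flash_attention_flops (n : Int) (d : Int) (bk : Int) : Prop := 1 ≤ bk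
instance (n : Int) (d : Int) (bk : Int) : Decidable (Pre_flash_attention_flops n d bk) := by unfold Pre_flash_attention_flops; infer_instance
def pvWitness_flash_attention_flops : Int × Int × Int := (5, 3, 2)


def Spec_flash_attention_flops (n : Int) (d : Int) (bk : Int) (out : Int) : Prop := out = flash_attention_flops_alt n d bk
instance (n : Int) (d : Int) (bk : Int) (out : Int) : Decidable (Spec_flash_attention_flops n d bk out) := by unfold Spec_flash_attention_flops; infer_instance

-- ===== CLAIM (what is proved, stated in full; the proofs are below) =====
def Claim_equal_flash_attention_flops : Prop := ∀ (n : Int) (d : Int) (bk : Int), Dom_flash_attention_flops n d bk → Pre_flash_attention_flops n d bk → Spec_flash_attention_flops n d bk (flash_attention_flops n d bk)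

-- ===== LEMMAS AND PROOFS =====
-- (verdict theorems are at the bottom of the file)

-- per-block contribution of A's inner loop body
def pvG (n d bk : Int) (kb : Int) : Int :=
  let bs := min bk (n - kb * bk)
  bs * (2 * d - 1) + max 0 (bs - 1) + (bs + bs) + max 0 (bs - 1) + d * (2 * bs - 1)
    + (if kb > 0 then 1 + 2 + 2 + 3 + d * 3 else 0)

lemma inner_fold_eq (n d bk N t : Int) :
    (PySem.List.pyRange 0 N 1).foldl (fun total kb =>
      let block_size := min bk (n - kb * bk)
      let total := total + block_size * (2 * d - 1)
      let total := total + max 0 (block_size - 1)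
      let total := total + (block_size + block_size)
      let total := total + max 0 (block_size - 1)
      let total := total + d * (2 * block_size - 1)
      if kb > 0 then total + (1 + 2 + 2 + 3 + d * 3) else total) t
    = t + ((PySem.List.pyRange 0 N 1).map (pvG n d bk)).sum := by
  have hfun : (fun (total kb : Int) =>
      let block_size := min bk (n - kb * bk)
      let total := total + block_size * (2 * d - 1)
      let total := total + max 0 (block_size - 1)
      let total := total + (block_size + block_size)
      let total := total + max 0 (block_size - 1)
      let total := total + d * (2 * block_size - 1)
      if kb > 0 then total + (1 + 2 + 2 + 3 + d * 3) else total)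
      = fun total kb => total + pvG n d bk kb := by
    funext total kb
    simp only [pvG]
    split_ifs <;> ring
  rw [hfun, PySem.List.foldl_add]

lemma pvG_full (n d bk kb : Int) (hbk : 1 ≤ bk) (hkb : 0 < kb) (hfull : bk ≤ n - kb * bk) :
    pvG n d bk kb = (4 * d * bk + 3 * bk - 2 - d) + (8 + 3 * d) := by
  simp only [pvG, min_eq_left hfull, if_pos hkb]
  have : max 0 (bk - 1) = bk - 1 := by omega
  rw [this]; ring

theorem flash_attention_flops_spec : Claim_equal_flash_attention_flops := by
  intro n d bk _ hpre
  unfold Pre_flash_attention_flops at hpre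
  unfold Spec_flash_attention_flops
  have hA : flash_attention_flops n d bk
      = (PySem.List.pyRange 0 n 1).foldl (fun total _ =>
          ((PySem.List.pyRange 0 (PySem.Int.floordiv (n + bk - 1) bk) 1).foldl (fun total kb =>
            let block_size := min bk (n - kb * bk)
            let total := total + block_size * (2 * d - 1)
            let total := total + max 0 (block_size - 1)
            let total := total + (block_size + block_size)
            let total := total + max 0 (block_size - 1)
            let total := total + d * (2 * block_size - 1)
            if kb > 0 then total + (1 + 2 + 2 + 3 + d * 3) else total) total)
          + (1 + d)) 0 := rfl
  have hB : flash_attention_flops_alt n d bk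
      = if n ≤ 0 then 0
        else n * ((PySem.Int.floordiv (n + bk - 1) bk - 1) * (4 * d * bk + 3 * bk - 2 - d)
          + (4 * d * (n - (PySem.Int.floordiv (n + bk - 1) bk - 1) * bk)
             + 3 * (n - (PySem.Int.floordiv (n + bk - 1) bk - 1) * bk) - 2 - d)
          + (PySem.Int.floordiv (n + bk - 1) bk - 1) * (8 + 3 * d) + (1 + d)) := rfl
  rw [hA, hB]
  by_cases hn : n ≤ 0
  · simp [PySem.List.pyRange_one_eq_nil hn, hn]
  · push_neg at hn
    rw [if_neg (by omega)]
    set N := PySem.Int.floordiv (n + bk - 1) bk with hNdef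
    have hb : (0:Int) < bk := by omega
    have hN := (PySem.Int.floordiv_eq_iff_of_pos hb).mp hNdef.symm
    have h1 : N * bk ≤ n + bk - 1 := hN.1
    have h2 : n + bk - 1 < (N + 1) * bk := hN.2
    have hub : n ≤ N * bk := by nlinarith
    have hlb : (N - 1) * bk ≤ n - 1 := by nlinarith
    have hN1 : 1 ≤ N := by nlinarith
    set r := n - (N - 1) * bk with hrdef
    have hr1 : 1 ≤ r := by rw [hrdef]; linarith
    have hr2 : r ≤ bk := by rw [hrdef]; nlinarith
    -- the inner loop's total contribution
    have hsum : ((PySem.List.pyRange 0 N 1).map (pvG n d bk)).sum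
        = (N - 1) * (4 * d * bk + 3 * bk - 2 - d) + (4 * d * r + 3 * r - 2 - d)
          + (N - 1) * (8 + 3 * d) := by
      by_cases hN2 : N = 1
      · have hrn : r = n := by rw [hrdef, hN2]; ring
        have hnb : n ≤ bk := by
          have := hub; rw [hN2] at this; nlinarith
        rw [hN2, hrn]
        have hone : PySem.List.pyRange 0 1 1 = [0] := PySem.List.pyRange_one_singleton 0
        rw [hone]
        simp only [List.map_cons, List.map_nil, List.sum_cons, List.sum_nil, pvG]
        simp only [zero_mul, sub_zero, min_eq_right hnb]
        have hmax : max 0 (n - 1) = n - 1 := by omega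
        rw [hmax, if_neg (lt_irrefl (0 : Int))]
        ring
      · have hN2' : 2 ≤ N := by
          rcases lt_or_ge N 2 with h | h
          · exact absurd (by linarith : N = 1) hN2
          · exact h
        have hsplit1 : PySem.List.pyRange 0 N 1 = 0 :: PySem.List.pyRange 1 N 1 :=
          PySem.List.pyRange_one_cons (by linarith)
        have hsplit2 : PySem.List.pyRange 1 N 1
            = PySem.List.pyRange 1 (N - 1) 1 ++ [N - 1] := by
          have := PySem.List.pyRange_one_succ_right (a := 1) (b := N - 1) (by linarith)
          simpa using this
        have hg0 : pvG n d bk 0 = 4 * d * bk + 3 * bk - 2 - d := by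
          have hfull : bk ≤ n - 0 * bk := by nlinarith
          simp only [pvG, min_eq_left hfull]
          have : max 0 (bk - 1) = bk - 1 := by omega
          rw [this]; norm_num; ring
        have hglast : pvG n d bk (N - 1) = (4 * d * r + 3 * r - 2 - d) + (8 + 3 * d) := by
          have hmin : min bk (n - (N - 1) * bk) = r := by
            have h' : n - (N - 1) * bk ≤ bk := by rw [hrdef] at hr2; linarith
            rw [min_eq_right h', ← hrdef]
          simp only [pvG, hmin, if_pos (by linarith : (0:Int) < N - 1)]
          have : max 0 (r - 1) = r - 1 := max_eq_right (by linarith)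
          rw [this]; ring
        have hmid : (PySem.List.pyRange 1 (N - 1) 1).map (pvG n d bk)
            = (PySem.List.pyRange 1 (N - 1) 1).map
                (fun _ => (4 * d * bk + 3 * bk - 2 - d) + (8 + 3 * d)) := by
          apply List.map_congr_left
          intro kb hkb
          rw [PySem.List.mem_pyRange_one] at hkb
          have hfull : bk ≤ n - kb * bk := by
            nlinarith [mul_le_mul_of_nonneg_right (show kb + 1 ≤ N - 1 by linarith [hkb.2]) (le_of_lt hb)]
          exact pvG_full n d bk kb hpre (by linarith [hkb.1]) hfull
        rw [hsplit1, hsplit2]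
        simp only [List.map_cons, List.map_append, List.map_cons, List.map_nil,
          List.sum_cons, List.sum_append, List.sum_nil]
        rw [hg0, hglast, hmid, PySem.List.sum_map_const_int]
        rw [PySem.List.length_pyRange_one]
        have : ((N - 1 - 1).toNat : Int) = N - 1 - 1 :=
          Int.toNat_of_nonneg (by linarith)
        rw [this]; ring
    -- outer loop: each row adds the same constant
    have houter : (fun (total : Int) (_ : Int) =>
        ((PySem.List.pyRange 0 N 1).foldl (fun total kb =>
          let block_size := min bk (n - kb * bk)
          let total := total + block_size * (2 * d - 1)
          let total := total + max 0 (block_size - 1)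
          let total := total + (block_size + block_size)
          let total := total + max 0 (block_size - 1)
          let total := total + d * (2 * block_size - 1)
          if kb > 0 then total + (1 + 2 + 2 + 3 + d * 3) else total) total) + (1 + d))
        = fun total _ => total +
            (((PySem.List.pyRange 0 N 1).map (pvG n d bk)).sum + (1 + d)) := by
      funext total k
      rw [inner_fold_eq]; ring
    rw [houter, PySem.List.foldl_add]
    rw [hsum]
    have hconst : ∀ c : Int, ((PySem.List.pyRange 0 n 1).map (fun _ => c)).sum
        = n * c := by
      intro c
      rw [PySem.List.sum_map_const_int, PySem.List.length_pyRange_one]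
      have : ((n - 0).toNat : Int) = n := by
        rw [Int.toNat_of_nonneg (by linarith)]; ring
      rw [this]
    rw [hconst]
    ring
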